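-- pv_equiv track=rewrite | github.com/emaeon/algorithm | [BOJ]문제집X[프로그래머스]알고리즘KIT/스택/프로그래머스 기능개발.py | solution
-- ===== SOURCE A (Python) =====
-- def solution(progresses, speeds):
--     answer = []
--     cnt = 0
--
--     while progresses:
--
--         for i in range(len(progresses)):
--             progresses[i] += speeds[i]
--
--         if progresses[0] >= 100 :
--
--             while True :
--
--                 if len(progresses) > 0 :
--
--                     if progresses[0] >= 100 :
--                         progresses.pop(0)
--                         speeds.pop(0)
--                         cnt += 1
--
--                     else : break
--                 else : break
--
--             answer.append(cnt)
--             cnt = 0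
--
--     return answer
-- ===== SOURCE B (Python) =====
-- def solution(progresses, speeds):
--     # finish day per task: smallest d >= 1 with p + d*s >= 100
--     days = [1 if p + s >= 100 else -(-(100 - p) // s) for p, s in zip(progresses, speeds)]
--     answer = []
--     cur = 0
--     cnt = 0
--     for d in days:
--         if cur < d:
--             if cnt != 0:
--                 answer.append(cnt)
--             cur = d
--             cnt = 1
--         else:
--             cnt += 1
--     if cnt != 0:
--         answer.append(cnt)
--     return answer
-- ===== Notes on version B (the rewrite author's own statement) =====
-- stated objective: faster
-- what changed: Replaces A's day-by-day simulation with repeated pop(0) by a closed-form finish day ceil((100-p)/s) per task and a single pass grouping consecutive tasks under the running maximum finish day.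
-- outside the precondition, e.g. on solution([150], [-50]): A returns [1], B returns [1]
import Mathlib
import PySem

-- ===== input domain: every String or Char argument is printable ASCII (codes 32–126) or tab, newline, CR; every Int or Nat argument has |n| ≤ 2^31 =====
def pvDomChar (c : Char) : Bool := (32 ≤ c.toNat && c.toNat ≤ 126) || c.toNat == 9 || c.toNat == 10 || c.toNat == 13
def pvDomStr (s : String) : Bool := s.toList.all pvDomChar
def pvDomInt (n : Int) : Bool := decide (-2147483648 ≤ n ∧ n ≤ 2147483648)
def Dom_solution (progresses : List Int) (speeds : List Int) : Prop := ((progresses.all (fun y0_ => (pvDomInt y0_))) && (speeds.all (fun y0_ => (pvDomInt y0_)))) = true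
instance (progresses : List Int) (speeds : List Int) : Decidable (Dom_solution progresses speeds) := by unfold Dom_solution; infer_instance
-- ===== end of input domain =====

-- B replaces A's day-by-day simulation (with pop(0)) by a closed-form finish day per task and one
-- grouping pass; equivalence is about the RETURN value only — Python A empties its argument lists
-- in place, B does not mutate them.

-- ===== PORT A =====
-- inner `while True` pop loop: pop from both lists while progresses[0] >= 100, counting pops.
-- (`speeds.pop(0)` on an empty speeds list raises IndexError in Python; here `.tail` of [] is [] —
-- such inputs are excluded by Pre_solution.)
def popLoop : List Int → List Int → Int → List Int × List Int × Int
  | [], ss, cnt => ([], ss, cnt)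
  | p :: ps, ss, cnt =>
    if 100 ≤ p then popLoop ps ss.tail (cnt + 1) else (p :: ps, ss, cnt)

-- the outer `while progresses:` loop. The Nat fuel only makes the recursion total (Python A
-- diverges exactly where the fuel could run out; such inputs are excluded by Pre_solution).
-- `progresses[i] += speeds[i]` is the zipWith; Python raises IndexError when speeds is shorter —
-- excluded by Pre_solution (zipWith silently truncates there).
def outerLoop : Nat → List Int → List Int → Int → List Int → List Int
  | 0, _, _, _, answer => answer
  | _ + 1, [], _, _, answer => answer
  | fuel + 1, p :: ps, ss, cnt, answer =>
    let ps' := List.zipWith (· + ·) (p :: ps) ss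
    if 100 ≤ ps'.headD 0 then
      let r := popLoop ps' ss cnt
      outerLoop fuel r.1 r.2.1 0 (answer ++ [r.2.2])
    else
      outerLoop fuel ps' ss cnt answer

-- fuel bound: one outer iteration per simulated day, plus one final emptiness check
def fuelFor (ps : List Int) : Nat := 1 + (ps.map (fun p => 1 + (100 - p).toNat)).sum

def solution (progresses : List Int) (speeds : List Int) : List Int :=
  outerLoop (fuelFor progresses) progresses speeds 0 []

-- ===== PORT B =====
-- finish day of one task: smallest d ≥ 1 with p + d*s ≥ 100 (1 if p+s>=100 else -(-(100-p)//s))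
def dayI (t : Int × Int) : Int :=
  if 100 ≤ t.1 + t.2 then 1 else -(PySem.Int.floordiv (-(100 - t.1)) t.2)

-- one step of B's grouping loop over the finish days; state = (answer, cur, cnt)
def stepB (acc : List Int × Int × Int) (d : Int) : List Int × Int × Int :=
  if acc.2.1 < d then (if acc.2.2 ≠ 0 then acc.1 ++ [acc.2.2] else acc.1, d, 1)
  else (acc.1, acc.2.1, acc.2.2 + 1)

-- the grouping loop plus the final flush of cnt
def runB (ans : List Int) (cur cnt : Int) (ds : List Int) : List Int :=
  let r := ds.foldl stepB (ans, cur, cnt)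
  if r.2.2 ≠ 0 then r.1 ++ [r.2.2] else r.1

def solution_alt (progresses : List Int) (speeds : List Int) : List Int :=
  runB [] 0 0 ((List.zip progresses speeds).map dayI)

-- ===== PRECONDITION & SPEC =====
-- Pre_ excludes (a) speeds shorter than progresses, where A raises IndexError, and (b) any
-- non-positive speed among the first len(progresses) speeds: there A diverges unless every such
-- task already finishes after the first day (termination then depends on the whole schedule and
-- has no closed form; on the rare returning inputs, e.g. ([150], [-50]), A and B agree anyway).
def Pre_solution (progresses : List Int) (speeds : List Int) : Prop :=
  progresses.length ≤ speeds.length ∧ ∀ t ∈ List.zip progresses speeds, 0 < t.2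
instance (progresses : List Int) (speeds : List Int) : Decidable (Pre_solution progresses speeds) := by
  unfold Pre_solution; infer_instance

def pvWitness_solution : List Int × List Int := ([93, 30, 55, 60, 40, 95], [1, 30, 5, 10, 60, 7])

def Spec_solution (progresses : List Int) (speeds : List Int) (out : List Int) : Prop := out = solution_alt progresses speeds
instance (progresses : List Int) (speeds : List Int) (out : List Int) : Decidable (Spec_solution progresses speeds out) := by unfold Spec_solution; infer_instance

-- ===== CLAIM (what is proved, stated in full; the proofs are below) =====
def Claim_equal_solution : Prop := ∀ (progresses : List Int) (speeds : List Int), Dom_solution progresses speeds → Pre_solution progresses speeds → Spec_solution progresses speeds (solution progresses speeds)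

-- ===== LEMMAS AND PROOFS =====

-- the daily update `progresses[i] += speeds[i]` advances the elapsed-day parameter by one
lemma zipAdd : ∀ (ts : List (Int × Int)) (ss : List Int) (d : Int),
    ts.map Prod.snd = ss.take ts.length →
    List.zipWith (· + ·) (ts.map (fun t => t.1 + d * t.2)) ss
      = ts.map (fun t => t.1 + (d + 1) * t.2) := by
  intro ts
  induction ts with
  | nil => intro ss d _; simp
  | cons t ts ih =>
    intro ss d h
    cases ss with
    | nil => simp at h
    | cons s0 ss =>
      simp only [List.map_cons, List.length_cons, List.take_succ_cons, List.cons.injEq] at h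
      obtain ⟨h1, h2⟩ := h
      simp only [List.map_cons, List.zipWith_cons_cons, ih ss d h2, List.cons.injEq]
      refine ⟨by rw [← h1]; ring, trivial⟩

-- popLoop pops exactly the leading block of finished tasks
lemma popLoop_eq : ∀ (ps ss : List Int) (cnt : Int),
    popLoop ps ss cnt =
      (ps.dropWhile (fun p => decide (100 ≤ p)),
       ss.drop (ps.takeWhile (fun p => decide (100 ≤ p))).length,
       cnt + ((ps.takeWhile (fun p => decide (100 ≤ p))).length : Int)) := by
  intro ps
  induction ps with
  | nil => intro ss cnt; simp [popLoop]
  | cons p ps ih =>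
    intro ss cnt
    by_cases h : 100 ≤ p
    · have hb : (decide (100 ≤ p)) = true := by simpa using h
      have hstep : popLoop (p :: ps) ss cnt = popLoop ps ss.tail (cnt + 1) := by
        simp [popLoop, h]
      have htwc : List.takeWhile (fun p => decide (100 ≤ p)) (p :: ps)
          = p :: List.takeWhile (fun p => decide (100 ≤ p)) ps := by
        simp [h]
      have hdwc : List.dropWhile (fun p => decide (100 ≤ p)) (p :: ps)
          = List.dropWhile (fun p => decide (100 ≤ p)) ps := by
        simp [h]
      rw [hstep, ih, htwc, hdwc]
      refine Prod.ext rfl (Prod.ext ?_ ?_)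
      · show List.drop _ ss.tail = _
        rw [← List.drop_one, List.drop_drop]
        congr 1
        simp only [List.length_cons]
        omega
      · show cnt + 1 + _ = cnt + _
        simp only [List.length_cons]
        push_cast
        ring
    · have hb : (decide (100 ≤ p)) = false := by simpa using h
      simp [popLoop, h]

lemma dayI_le_iff (t : Int × Int) (d : Int) (hs : 0 < t.2) (hd : 1 ≤ d) :
    dayI t ≤ d ↔ 100 ≤ t.1 + d * t.2 := by
  obtain ⟨p, s⟩ := t
  simp only [dayI] at *
  split_ifs with h
  · constructor
    · intro _
      have h2 : 1 * s ≤ d * s := mul_le_mul_of_nonneg_right hd hs.le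
      simp only [one_mul] at h2; linarith
    · intro _; exact hd
  · rw [neg_le, PySem.Int.le_floordiv_iff_mul_le hs]
    constructor <;> intro h' <;> nlinarith [h']

lemma one_le_dayI (t : Int × Int) (hs : 0 < t.2) : 1 ≤ dayI t := by
  obtain ⟨p, s⟩ := t
  simp only [dayI] at *
  split_ifs with h
  · exact le_refl 1
  · rw [not_le] at h
    have h0 : ¬ (0 ≤ PySem.Int.floordiv (-(100 - p)) s) := by
      rw [PySem.Int.le_floordiv_iff_mul_le hs]; intro hh; linarith
    omega

lemma dayI_le_bound (t : Int × Int) (hs : 0 < t.2) :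
    dayI t ≤ 1 + ((100 - t.1).toNat : Int) := by
  have hd : (1 : Int) ≤ 1 + ((100 - t.1).toNat : Int) := by omega
  rw [dayI_le_iff t _ hs hd]
  have h1 : (1 + ((100 - t.1).toNat : Int)) * 1 ≤ (1 + ((100 - t.1).toNat : Int)) * t.2 := by
    apply mul_le_mul_of_nonneg_left hs (by omega)
  have h2 : 100 - t.1 ≤ ((100 - t.1).toNat : Int) := Int.self_le_toNat _
  linarith

def maxDay (ts : List (Int × Int)) : Int := ts.foldr (fun t m => max (dayI t) m) 0

lemma dayI_le_maxDay : ∀ (ts : List (Int × Int)) (t : Int × Int), t ∈ ts → dayI t ≤ maxDay ts := by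
  intro ts
  induction ts with
  | nil => intro t h; simp at h
  | cons u ts ih =>
    intro t h
    rcases List.mem_cons.mp h with h | h
    · subst h; exact le_max_left _ _
    · exact le_trans (ih t h) (le_max_right _ _)

lemma maxDay_dropWhile_le (Q : Int × Int → Bool) : ∀ (ts : List (Int × Int)),
    maxDay (ts.dropWhile Q) ≤ maxDay ts := by
  intro ts
  induction ts with
  | nil => simp [List.dropWhile]
  | cons t ts ih =>
    rw [List.dropWhile_cons]
    split_ifs with h
    · exact le_trans ih (le_max_right _ _)
    · exact le_refl _

lemma maxDay_le_sum : ∀ (ts : List (Int × Int)), (∀ t ∈ ts, 0 < t.2) →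
    maxDay ts ≤ (((ts.map (fun t => 1 + (100 - t.1).toNat)).sum : Nat) : Int) := by
  intro ts
  induction ts with
  | nil => intro _; simp [maxDay]
  | cons t ts ih =>
    intro h
    have h1 := dayI_le_bound t (h t (List.mem_cons_self ..))
    have h2 := ih (fun u hu => h u (List.mem_cons_of_mem _ hu))
    simp only [List.map_cons, List.sum_cons]
    have hm : maxDay (t :: ts) = max (dayI t) (maxDay ts) := rfl
    rw [hm]
    refine max_le (le_trans h1 ?_) (le_trans h2 ?_)
    · exact_mod_cast Nat.le_add_right _ _
    · exact_mod_cast Nat.le_add_left _ _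

-- runB only ever appends to the accumulated answer
lemma stepB_append (ans b : List Int) (c k d : Int) :
    stepB (ans ++ b, c, k) d
      = (ans ++ (stepB (b, c, k) d).1, (stepB (b, c, k) d).2.1, (stepB (b, c, k) d).2.2) := by
  simp only [stepB]
  split_ifs <;> simp [List.append_assoc]

lemma runB_cons (ans : List Int) (c k d : Int) (ds : List Int) :
    runB ans c k (d :: ds)
      = runB (stepB (ans, c, k) d).1 (stepB (ans, c, k) d).2.1 (stepB (ans, c, k) d).2.2 ds := by
  simp [runB]

lemma runB_append : ∀ (ds ans b : List Int) (c k : Int),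
    runB (ans ++ b) c k ds = ans ++ runB b c k ds := by
  intro ds
  induction ds with
  | nil =>
    intro ans b c k
    simp only [runB, List.foldl_nil]
    split_ifs <;> simp [List.append_assoc]
  | cons d ds ih =>
    intro ans b c k
    rw [runB_cons, stepB_append, ih, runB_cons]

-- days not above the current maximum only increment the counter
lemma runB_skip : ∀ (t : List Int) (D : Int), (∀ x ∈ t, x ≤ D) →
    ∀ (r ans : List Int) (cnt : Int),
      runB ans D cnt (t ++ r) = runB ans D (cnt + (t.length : Int)) r := by
  intro t
  induction t with
  | nil => intro D _ r ans cnt; simp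
  | cons x t ih =>
    intro D h r ans cnt
    have hx : ¬ (D < x) := not_lt.mpr (h x (List.mem_cons_self ..))
    rw [List.cons_append, runB_cons]
    simp only [stepB, if_neg hx]
    rw [ih D (fun y hy => h y (List.mem_cons_of_mem _ hy)) r ans (cnt + 1)]
    simp only [List.length_cons]
    push_cast
    ring_nf

-- one group of B: the head day D and every following day ≤ D
lemma runB_group (D : Int) (hD : 0 < D) (rest : List Int) :
    runB [] 0 0 (D :: rest)
      = (1 + ((rest.takeWhile (fun x => decide (x ≤ D))).length : Int))
        :: runB [] 0 0 (rest.dropWhile (fun x => decide (x ≤ D))) := by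
  have hsplit := List.takeWhile_append_dropWhile (p := fun x => decide (x ≤ D)) (l := rest)
  have hne : (1 : Int) + ((rest.takeWhile (fun x => decide (x ≤ D))).length : Int) ≠ 0 := by omega
  rw [runB_cons]
  simp only [stepB, if_pos hD, if_neg (by simp : ¬ ((0:Int) ≠ 0))]
  conv_lhs => rw [← hsplit]
  rw [runB_skip _ D (fun y hy => by simpa using List.mem_takeWhile_imp hy)]
  cases hr : rest.dropWhile (fun x => decide (x ≤ D)) with
  | nil =>
    simp only [runB, List.foldl_nil, if_pos hne]
    simp
  | cons d' r'' =>
    have hd' : ¬ (d' ≤ D) := by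
      have := List.head?_dropWhile_not (p := fun x => decide (x ≤ D)) (l := rest)
      rw [hr] at this
      simpa using this
    have hDd' : D < d' := not_le.mp hd'
    rw [runB_cons, runB_cons]
    simp only [stepB, if_pos hDd', if_pos (lt_trans hD hDd'), if_pos hne,
      if_neg (by simp : ¬ ((0:Int) ≠ 0))]
    rw [show (([] : List Int) ++ [1 + ((rest.takeWhile (fun x => decide (x ≤ D))).length : Int)])
          = [1 + ((rest.takeWhile (fun x => decide (x ≤ D))).length : Int)] ++ ([] : List Int) by simp]
    rw [runB_append]
    simp [List.cons_append]

-- takeWhile/dropWhile on "finished after d days" coincide with "finish day ≤ d"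
lemma tw_dw_congr : ∀ (l : List (Int × Int)) (d : Int), 1 ≤ d → (∀ t ∈ l, 0 < t.2) →
    l.takeWhile (fun t => decide (100 ≤ t.1 + d * t.2))
        = l.takeWhile (fun t => decide (dayI t ≤ d))
    ∧ l.dropWhile (fun t => decide (100 ≤ t.1 + d * t.2))
        = l.dropWhile (fun t => decide (dayI t ≤ d)) := by
  intro l
  induction l with
  | nil => intro d _ _; simp
  | cons t l ih =>
    intro d hd h
    have hiff : (100 ≤ t.1 + d * t.2) ↔ dayI t ≤ d :=
      (dayI_le_iff t d (h t (List.mem_cons_self ..)) hd).symm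
    obtain ⟨ih1, ih2⟩ := ih d hd (fun u hu => h u (List.mem_cons_of_mem _ hu))
    by_cases hc : dayI t ≤ d
    · simp [hiff.mpr hc, hc, ih1, ih2]
    · have hb : (decide (100 ≤ t.1 + d * t.2)) = false := by
        simpa using fun hh => hc (hiff.mp hh)
      have hb2 : (decide (dayI t ≤ d)) = false := by simpa using hc
      rw [List.takeWhile_cons_of_neg (by simp [hb]), List.takeWhile_cons_of_neg (by simp [hb2]),
        List.dropWhile_cons_of_neg (by simp [hb]), List.dropWhile_cons_of_neg (by simp [hb2])]
      exact ⟨rfl, rfl⟩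

lemma dropWhile_eq_drop : ∀ (l : List α) (p : α → Bool),
    l.dropWhile p = l.drop (l.takeWhile p).length := by
  intro l
  induction l with
  | nil => intro p; simp
  | cons x l ih =>
    intro p
    rw [List.takeWhile_cons, List.dropWhile_cons]
    split_ifs with h <;> simp [ih]

-- the main loop invariant: after d elapsed days, with the unfinished suffix ts of the tasks,
-- A's remaining simulation produces exactly B's grouping of the remaining finish days
lemma main_loop : ∀ (fuel : Nat) (ts : List (Int × Int)) (ss : List Int) (d : Int) (ans : List Int),
    ts.map Prod.snd = ss.take ts.length →
    (∀ t ∈ ts, 0 < t.2) →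
    (∀ t, ts.head? = some t → d < dayI t) →
    0 ≤ d →
    (if ts.isEmpty then 1 else (maxDay ts - d).toNat + 1) ≤ fuel →
    outerLoop fuel (ts.map (fun t => t.1 + d * t.2)) ss 0 ans
      = ans ++ runB [] 0 0 (ts.map dayI) := by
  intro fuel
  induction fuel with
  | zero =>
    intro ts ss d ans _ _ _ _ h5
    split at h5 <;> omega
  | succ fuel ih =>
    intro ts ss d ans h1 h2 h3 h4 h5
    cases ts with
    | nil => simp [outerLoop, runB]
    | cons t ts' =>
      have hzw := zipAdd (t :: ts') ss d h1
      have hpos : 0 < t.2 := h2 t (List.mem_cons_self ..)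
      have hday1 : d + 1 ≤ dayI t := by
        have := h3 t rfl; omega
      have hone : (1 : Int) ≤ d + 1 := by omega
      have hmax : dayI t ≤ maxDay (t :: ts') := dayI_le_maxDay _ t (List.mem_cons_self ..)
      simp only [List.map_cons] at hzw
      simp only [List.isEmpty_cons, Bool.false_eq_true, if_false] at h5
      simp only [List.map_cons, outerLoop, hzw, List.headD_cons]
      by_cases hc : 100 ≤ t.1 + (d + 1) * t.2
      · -- the head finishes on day d+1: pop the whole finished block
        have hdayle : dayI t ≤ d + 1 := (dayI_le_iff t (d + 1) hpos hone).mpr hc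
        have hdayeq : dayI t = d + 1 := le_antisymm hdayle hday1
        have hQt : (decide (dayI t ≤ d + 1)) = true := by simpa using hdayle
        obtain ⟨htw, hdw⟩ := tw_dw_congr (t :: ts') (d + 1) hone h2
        rw [if_pos hc, popLoop_eq]
        have hmapc : (t.1 + (d + 1) * t.2) :: List.map (fun u : Int × Int => u.1 + (d + 1) * u.2) ts'
            = List.map (fun u : Int × Int => u.1 + (d + 1) * u.2) (t :: ts') := rfl
        rw [hmapc]
        simp only [List.takeWhile_map, List.dropWhile_map, List.length_map, Function.comp_def]
        rw [htw, hdw]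
        set Q : Int × Int → Bool := fun u => decide (dayI u ≤ d + 1) with hQ
        have htwc : (t :: ts').takeWhile Q = t :: ts'.takeWhile Q :=
          List.takeWhile_cons_of_pos hQt
        have hdwc : (t :: ts').dropWhile Q = ts'.dropWhile Q :=
          List.dropWhile_cons_of_pos hQt
        set ts'' : List (Int × Int) := ts'.dropWhile Q with hts''
        set k : Nat := ((t :: ts').takeWhile Q).length with hk
        -- prepare the inductive hypothesis for the remaining tasks
        have hsub : ∀ u ∈ ts'', u ∈ t :: ts' := by
          intro u hu
          exact List.mem_cons_of_mem _ ((List.dropWhile_sublist Q (l := ts')).subset hu)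
        have h1'' : ts''.map Prod.snd = (ss.drop k).take ts''.length := by
          have hdrop : ts'' = (t :: ts').drop k := by
            rw [hk, ← dropWhile_eq_drop, hdwc]
          rw [hdrop, List.map_drop, h1, List.drop_take, List.length_drop]
        have h2'' : ∀ u ∈ ts'', 0 < u.2 := fun u hu => h2 u (hsub u hu)
        have h3'' : ∀ u, ts''.head? = some u → d + 1 < dayI u := by
          intro u hu
          have hnot : Q u = false := by
            have := List.head?_dropWhile_not (p := Q) (l := ts')
            rw [← hts''] at this
            rw [hu] at this
            simpa using this
          have : ¬ (dayI u ≤ d + 1) := by simpa [hQ] using hnot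
          omega
        have hmd : maxDay ts'' ≤ maxDay (t :: ts') := by
          calc maxDay ts'' ≤ maxDay ts' := maxDay_dropWhile_le Q ts'
            _ ≤ maxDay (t :: ts') := le_max_right _ _
        have hb'' : (if ts''.isEmpty then 1 else (maxDay ts'' - (d + 1)).toNat + 1) ≤ fuel := by
          split <;> omega
        have hih := ih ts'' (ss.drop k) (d + 1) (ans ++ [(0 : Int) + (k : Int)])
          h1'' h2'' h3'' (by omega) hb''
        rw [hdwc, hih]
        -- now compute B's first group
        rw [runB_group (dayI t) (by omega) (ts'.map dayI)]
        have hcomp2 : ((fun x : Int => decide (x ≤ dayI t)) ∘ dayI)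
            = (fun u : Int × Int => decide (dayI u ≤ dayI t)) := rfl
        have htwd : (ts'.map dayI).takeWhile (fun x => decide (x ≤ dayI t))
            = (ts'.takeWhile Q).map dayI := by
          rw [List.takeWhile_map, hcomp2, hdayeq]
        have hdwd : (ts'.map dayI).dropWhile (fun x => decide (x ≤ dayI t))
            = ts''.map dayI := by
          rw [List.dropWhile_map, hcomp2, hdayeq, hts'']
        rw [htwd, hdwd, List.length_map]
        have hkk : (0 : Int) + (k : Int) = 1 + ((ts'.takeWhile Q).length : Int) := by
          rw [hk, htwc]
          push_cast [List.length_cons]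
          ring
        rw [hkk]
        simp [List.append_assoc]
      · -- nobody finishes: one more day passes
        rw [if_neg hc]
        have h3' : ∀ u, (t :: ts').head? = some u → d + 1 < dayI u := by
          intro u hu
          have hu' : t = u := by simpa using hu
          subst hu'
          have hnot : ¬ (dayI t ≤ d + 1) := fun hh =>
            hc ((dayI_le_iff t (d + 1) hpos hone).mp hh)
          omega
        have hb' : (if (t :: ts').isEmpty then 1 else (maxDay (t :: ts') - (d + 1)).toNat + 1)
            ≤ fuel := by
          have : d + 1 < dayI t := by
            have := h3' t rfl; omega
          simp only [List.isEmpty_cons, Bool.false_eq_true, if_false]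
          omega
        have hih := ih (t :: ts') ss (d + 1) ans h1 h2 h3' (by omega) hb'
        simpa using hih

-- ===== VERDICT (by name: the statement is the Claim_ definition above) =====
lemma map_snd_zip_take : ∀ (ps : List Int) (ss : List Int), ps.length ≤ ss.length →
    (List.zip ps ss).map Prod.snd = ss.take (List.zip ps ss).length := by
  intro ps
  induction ps with
  | nil => intro ss _; simp
  | cons p ps ih =>
    intro ss h
    cases ss with
    | nil => simp at h
    | cons s0 ss =>
      simp only [List.zip_cons_cons, List.map_cons, List.length_cons, List.take_succ_cons]
      rw [ih ss (by simpa using h)]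

theorem solution_spec : Claim_equal_solution := by
  intro ps ss _ hpre
  obtain ⟨hlen, hpos⟩ := hpre
  unfold Spec_solution solution solution_alt
  have hfst : (List.zip ps ss).map Prod.fst = ps := List.map_fst_zip hlen
  have hsnd := map_snd_zip_take ps ss hlen
  have hfun : (fun t : Int × Int => t.1 + 0 * t.2) = Prod.fst := funext fun u => by ring
  have hf : fuelFor ps = 1 + ((List.zip ps ss).map (fun t => 1 + (100 - t.1).toNat)).sum := by
    rw [fuelFor]
    conv_lhs => rw [← hfst]
    rw [List.map_map]
    rfl
  have hbound : (if (List.zip ps ss).isEmpty then 1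
      else (maxDay (List.zip ps ss) - 0).toNat + 1) ≤ fuelFor ps := by
    have hms := maxDay_le_sum (List.zip ps ss) hpos
    rw [hf]
    split <;> omega
  have h3 : ∀ u, (List.zip ps ss).head? = some u → (0 : Int) < dayI u := by
    intro u hu
    have hm : u ∈ List.zip ps ss := by
      cases hz : List.zip ps ss with
      | nil => rw [hz] at hu; simp at hu
      | cons a l =>
        rw [hz] at hu
        simp only [List.head?_cons, Option.some.injEq] at hu
        subst hu
        exact List.mem_cons_self ..
    have := one_le_dayI u (hpos u hm)
    omega
  have main := main_loop (fuelFor ps) (List.zip ps ss) ss 0 [] hsnd hpos h3 le_rfl hbound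
  rw [hfun, hfst] at main
  simpa using main
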